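-- pv_equiv track=rewrite | github.com/robwa10/mia | mia.py | dict_create
-- ===== SOURCE A (Python) =====
-- def dict_create(a_list, fir, las, dt):
--     """Turn the list into a dictionary of dictionaries."""
--     a_dict = {}
--     for i in a_list:
--         name = i[fir] + ' ' + i[las]
--         if name in a_dict:
--             if a_dict[name]['last attendance'] < i[dt]:
--                 a_dict[name]['last attendance'] = i[dt]
--         else:
--             a_dict[name] = {'last attendance': i[dt]}
--     return a_dict
-- ===== SOURCE B (Python) =====
-- def dict_create(a_list, fir, las, dt):
--     """Turn the list into a dictionary of dictionaries."""
--     names = []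
--     for i in a_list:
--         name = i[fir] + ' ' + i[las]
--         if name not in names:
--             names.append(name)
--     return {name: {'last attendance': max(i[dt] for i in a_list
--                                           if i[fir] + ' ' + i[las] == name)}
--             for name in names}
-- ===== Notes on version B (the rewrite author's own statement) =====
-- stated objective: alternative
-- what changed: Instead of A's single pass maintaining a dict with an inline running-max update, B first collects the distinct 'first last' names in first-seen order into a list, then builds the result with a comprehension that re-scans a_list per name and takes max() of that name's dt values.
import Mathlib
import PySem

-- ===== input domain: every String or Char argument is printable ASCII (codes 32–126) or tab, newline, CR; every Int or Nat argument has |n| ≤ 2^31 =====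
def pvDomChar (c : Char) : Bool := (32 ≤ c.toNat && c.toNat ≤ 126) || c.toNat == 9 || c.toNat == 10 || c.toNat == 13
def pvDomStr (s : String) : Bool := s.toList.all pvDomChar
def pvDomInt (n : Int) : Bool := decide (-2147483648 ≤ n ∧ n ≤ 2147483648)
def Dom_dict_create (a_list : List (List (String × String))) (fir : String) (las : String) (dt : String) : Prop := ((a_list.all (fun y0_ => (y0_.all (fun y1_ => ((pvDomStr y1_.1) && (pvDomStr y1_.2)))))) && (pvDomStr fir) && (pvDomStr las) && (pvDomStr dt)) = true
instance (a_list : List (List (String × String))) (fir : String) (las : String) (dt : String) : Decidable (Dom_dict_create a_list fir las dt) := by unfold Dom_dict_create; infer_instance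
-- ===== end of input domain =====

-- B collects the distinct names first and then takes max() over a per-name re-scan of the list,
-- instead of A's single pass with a dict and an inline running-max update; alternative decomposition, same values.

-- ===== PORT A =====
-- loop body of A, named (the loop is a foldl over it)
def dictCreateStep (fir las dt : String) (d : PySem.Dict String (PySem.Dict String String)) (i : List (String × String)) : PySem.Dict String (PySem.Dict String String) :=
  let name := ((i.lookup fir).getD "") ++ " " ++ ((i.lookup las).getD "")
  if d.contains name then
    if ((d.get? name).getD PySem.Dict.empty).getD "last attendance" "" < (i.lookup dt).getD "" then
      d.insert name (((d.get? name).getD PySem.Dict.empty).insert "last attendance" ((i.lookup dt).getD ""))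
    else d
  else
    d.insert name (PySem.Dict.ofList [("last attendance", (i.lookup dt).getD "")])

def dict_create (a_list : List (List (String × String))) (fir : String) (las : String) (dt : String) : List (String × List (String × String)) :=
  ((a_list.foldl (dictCreateStep fir las dt) PySem.Dict.empty).items.map (fun p => (p.1, p.2.items)))

-- ===== PORT B =====
-- first loop of B: collect the distinct names in first-seen order (Python list membership test)
def namesStep (fir las : String) (acc : List String) (i : List (String × String)) : List String :=
  let name := ((i.lookup fir).getD "") ++ " " ++ ((i.lookup las).getD "")
  if acc.contains name then acc else acc ++ [name]

-- Python max(...) on nonempty string sequences: first maximal element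
def pvMax (vals : List String) : String := (PySem.List.max? vals (fun s => s)).getD ""

-- second phase of B: the comprehension {name: {'last attendance': max(i[dt] for i in a_list if …)} for name in names}
def dict_create_alt (a_list : List (List (String × String))) (fir : String) (las : String) (dt : String) : List (String × List (String × String)) :=
  (a_list.foldl (namesStep fir las) []).map (fun name =>
    (name, [("last attendance",
      pvMax ((a_list.filter (fun i => ((i.lookup fir).getD "") ++ " " ++ ((i.lookup las).getD "") == name)).map (fun i => (i.lookup dt).getD "")))]))

-- ===== PRECONDITION & SPEC =====
-- Pre_ excludes exactly the records missing one of the keys fir/las/dt, on which Python A raises KeyError.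
def Pre_dict_create (a_list : List (List (String × String))) (fir : String) (las : String) (dt : String) : Prop :=
  (a_list.all (fun i => (i.lookup fir).isSome && (i.lookup las).isSome && (i.lookup dt).isSome)) = true
instance (a_list : List (List (String × String))) (fir : String) (las : String) (dt : String) : Decidable (Pre_dict_create a_list fir las dt) := by unfold Pre_dict_create; infer_instance

def pvWitness_dict_create : (List (List (String × String))) × String × String × String :=
  ([[("f", "Ann"), ("l", "Lee"), ("d", "2020-01-01")], [("f", "Ann"), ("l", "Lee"), ("d", "2021-05-02")]], "f", "l", "d")

def Spec_dict_create (a_list : List (List (String × String))) (fir : String) (las : String) (dt : String) (out : List (String × List (String × String))) : Prop := out = dict_create_alt a_list fir las dt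
instance (a_list : List (List (String × String))) (fir : String) (las : String) (dt : String) (out : List (String × List (String × String))) : Decidable (Spec_dict_create a_list fir las dt out) := by unfold Spec_dict_create; infer_instance

-- ===== CLAIM (what is proved, stated in full; the proofs are below) =====
def Claim_equal_dict_create : Prop := ∀ (a_list : List (List (String × String))) (fir : String) (las : String) (dt : String), Dom_dict_create a_list fir las dt → Pre_dict_create a_list fir las dt → Spec_dict_create a_list fir las dt (dict_create a_list fir las dt)

-- ===== LEMMAS AND PROOFS =====

-- shared abbreviations for the proofs (definitionally equal to the expressions in both ports)
def pvKey (fir las : String) (i : List (String × String)) : String :=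
  ((i.lookup fir).getD "") ++ " " ++ ((i.lookup las).getD "")
def pvVal (dt : String) (i : List (String × String)) : String := (i.lookup dt).getD ""
def pvMaxFor (fir las dt n : String) (l : List (List (String × String))) : String :=
  pvMax ((l.filter (fun i => pvKey fir las i == n)).map (pvVal dt))

def pvMaxStep (a : Option String) (x : String) : Option String :=
  match a with
  | none => some x
  | some m => if m < x then some x else some m

lemma pvMaxStep_some (acc x : String) :
    pvMaxStep (some acc) x = if acc < x then some x else some acc := rfl

lemma max?_eq_foldl (xs : List String) :
    PySem.List.max? xs (fun s => s) = xs.foldl pvMaxStep none := by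
  unfold PySem.List.max?
  congr 1
  funext a x
  cases a <;> rfl

lemma pvMax_foldl_isSome (t : List String) (acc : String) :
    (t.foldl pvMaxStep (some acc)).isSome = true := by
  induction t generalizing acc with
  | nil => rfl
  | cons x t ih =>
    rw [List.foldl_cons, pvMaxStep_some]
    by_cases h : acc < x
    · rw [if_pos h]; exact ih x
    · rw [if_neg h]; exact ih acc

lemma pvMax_append (vals : List String) (v : String) (h : vals ≠ []) :
    pvMax (vals ++ [v]) = if pvMax vals < v then v else pvMax vals := by
  have hsome : (PySem.List.max? vals (fun s => s)).isSome = true := by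
    rw [max?_eq_foldl]
    cases vals with
    | nil => exact absurd rfl h
    | cons x t => rw [List.foldl_cons]; exact pvMax_foldl_isSome t x
  obtain ⟨m, hm⟩ := Option.isSome_iff_exists.mp hsome
  have hm' : List.foldl pvMaxStep none vals = some m := by rw [← max?_eq_foldl]; exact hm
  have happ : PySem.List.max? (vals ++ [v]) (fun s => s)
      = if m < v then some v else some m := by
    rw [max?_eq_foldl, List.foldl_append, hm', List.foldl_cons, pvMaxStep_some, List.foldl_nil]
  unfold pvMax
  rw [happ, hm]
  by_cases hlt : m < v <;> simp [hlt]

lemma namesStep_eq (fir las : String) (acc : List String) (i : List (String × String)) :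
    namesStep fir las acc i = if acc.contains (pvKey fir las i) then acc else acc ++ [pvKey fir las i] := rfl

lemma mem_names_aux (fir las : String) (l : List (List (String × String))) :
    ∀ (acc : List String) (n : String),
      n ∈ l.foldl (namesStep fir las) acc ↔ n ∈ acc ∨ ∃ i ∈ l, pvKey fir las i = n := by
  induction l with
  | nil => intro acc n; simp
  | cons y l ih =>
    intro acc n
    rw [List.foldl_cons, namesStep_eq, ih]
    by_cases h : acc.contains (pvKey fir las y)
    · rw [if_pos h]
      have hmem : pvKey fir las y ∈ acc := by simpa using h
      constructor
      · rintro (ha | hb)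
        · exact Or.inl ha
        · exact Or.inr (by rcases hb with ⟨i, hi, hk⟩; exact ⟨i, List.mem_cons_of_mem _ hi, hk⟩)
      · rintro (ha | ⟨i, hi, hk⟩)
        · exact Or.inl ha
        · rcases List.mem_cons.mp hi with rfl | hi'
          · exact Or.inl (hk ▸ hmem)
          · exact Or.inr ⟨i, hi', hk⟩
    · rw [if_neg h]
      constructor
      · rintro (ha | hb)
        · rcases List.mem_append.mp ha with ha' | ha'
          · exact Or.inl ha'
          · have hny : n = pvKey fir las y := by simpa using ha'
            exact Or.inr ⟨y, by simp, hny.symm⟩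
        · exact Or.inr (by rcases hb with ⟨i, hi, hk⟩; exact ⟨i, List.mem_cons_of_mem _ hi, hk⟩)
      · rintro (ha | ⟨i, hi, hk⟩)
        · exact Or.inl (List.mem_append.mpr (Or.inl ha))
        · rcases List.mem_cons.mp hi with rfl | hi'
          · exact Or.inl (List.mem_append.mpr (Or.inr (by simp [hk])))
          · exact Or.inr ⟨i, hi', hk⟩

lemma mem_names_iff_filter_ne_nil (fir las : String) (l : List (List (String × String))) (n : String) :
    n ∈ l.foldl (namesStep fir las) [] ↔ l.filter (fun i => pvKey fir las i == n) ≠ [] := by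
  rw [mem_names_aux]
  simp [List.filter_eq_nil_iff]

lemma find?_map_key {α : Type} (g : String → α) (N : List String) (k : String) (hk : k ∈ N) :
    ((N.map (fun n => (n, g n))).find? (fun p => p.1 == k)) = some (k, g k) := by
  induction N with
  | nil => cases hk
  | cons m N ih =>
    simp only [List.map_cons, List.find?_cons]
    by_cases h : (m == k) = true
    · have hm : m = k := by simpa using h
      subst hm; simp
    · have hk' : k ∈ N := by
        rcases List.mem_cons.mp hk with rfl | h'
        · exact absurd (by simp) h
        · exact h'
      simpa [h] using ih hk'

lemma any_beq_eq_contains (N : List String) (k : String) :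
    (N.any fun x => x == k) = N.contains k := by
  induction N with
  | nil => rfl
  | cons m M ih =>
    by_cases h : m = k
    · simp [h, ih]
    · have h' : ¬ k = m := fun e => h e.symm
      simp [h, h', ih, beq_iff_eq]

-- lookup facts for a dict whose items list is a key→entry map
lemma contains_of_items {ν : Type} (d : PySem.Dict String ν) (g : String → ν) (N : List String)
    (hd : d.items = N.map (fun n => (n, g n))) (k : String) :
    d.contains k = N.contains k := by
  simp only [PySem.Dict.contains, hd, List.any_map, Function.comp_def]
  exact any_beq_eq_contains N k

lemma get?_of_items {ν : Type} (d : PySem.Dict String ν) (g : String → ν) (N : List String)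
    (hd : d.items = N.map (fun n => (n, g n))) (k : String) (hk : k ∈ N) :
    d.get? k = some (g k) := by
  simp [PySem.Dict.get?, hd, find?_map_key g N k hk]

lemma inner_getD (m : String) :
    (PySem.Dict.mk [("last attendance", m)]).getD "last attendance" "" = m := by
  simp [PySem.Dict.getD, PySem.Dict.get?]

lemma inner_insert (m v : String) :
    (PySem.Dict.mk [("last attendance", m)]).insert "last attendance" v
      = PySem.Dict.mk [("last attendance", v)] := by
  simp [PySem.Dict.insert, PySem.Dict.contains]

lemma maxFor_append (fir las dt n : String) (t : List (List (String × String))) (x : List (String × String)) :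
    pvMaxFor fir las dt n (t ++ [x])
      = if pvKey fir las x == n
        then pvMax (((t.filter (fun i => pvKey fir las i == n)).map (pvVal dt)) ++ [pvVal dt x])
        else pvMaxFor fir las dt n t := by
  unfold pvMaxFor
  rw [List.filter_append]
  by_cases h : (pvKey fir las x == n) = true <;> simp [h]

-- the invariant: A's dict after the fold is exactly B's name list paired with the per-name maxima
lemma main_items (fir las dt : String) (l : List (List (String × String))) :
    (l.foldl (dictCreateStep fir las dt) PySem.Dict.empty).items
      = (l.foldl (namesStep fir las) []).map
          (fun n => (n, PySem.Dict.mk [("last attendance", pvMaxFor fir las dt n l)])) := by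
  induction l using List.reverseRecOn with
  | nil => rfl
  | append_singleton t x ih =>
    rw [List.foldl_append, List.foldl_append]
    simp only [List.foldl_cons, List.foldl_nil]
    set N := t.foldl (namesStep fir las) [] with hN
    set d := t.foldl (dictCreateStep fir las dt) PySem.Dict.empty with hdd
    set k := pvKey fir las x with hk
    set v := pvVal dt x with hv
    have hstep : dictCreateStep fir las dt d x =
        (if d.contains k then
          if ((d.get? k).getD PySem.Dict.empty).getD "last attendance" "" < v then
            d.insert k (((d.get? k).getD PySem.Dict.empty).insert "last attendance" v)
          else d
        else d.insert k (PySem.Dict.ofList [("last attendance", v)])) := rfl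
    have hcont : d.contains k = N.contains k := contains_of_items d _ N ih k
    by_cases hkN : k ∈ N
    · -- existing name: names list unchanged, running max updated in place
      have hc : d.contains k = true := by rw [hcont]; simpa using hkN
      have hns : namesStep fir las N x = N := by rw [namesStep_eq, ← hk, if_pos (by simpa using hkN)]
      have hget : d.get? k = some (PySem.Dict.mk [("last attendance", pvMaxFor fir las dt k t)]) :=
        get?_of_items d _ N ih k hkN
      have hfne : (t.filter (fun i => pvKey fir las i == k)).map (pvVal dt) ≠ [] := by
        have := (mem_names_iff_filter_ne_nil fir las t k).mp hkN
        simpa using this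
      have hMk : pvMaxFor fir las dt k (t ++ [x])
          = if pvMaxFor fir las dt k t < v then v else pvMaxFor fir las dt k t := by
        rw [maxFor_append, if_pos (by simp [← hk]), ← hv, pvMax_append _ _ hfne]; rfl
      rw [hstep, hns, if_pos hc, hget]
      by_cases hlt : pvMaxFor fir las dt k t < v
      · rw [if_pos (by simpa [inner_getD] using hlt)]
        simp only [Option.getD_some, inner_insert]
        rw [PySem.Dict.items_insert, if_pos hc, ih, List.map_map]
        refine List.map_congr_left ?_
        intro n _
        by_cases hn : n = k
        · subst hn; simp [hMk, hlt]
        · have hn' : ¬ k = n := fun h => hn h.symm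
          simp [hn, hn', maxFor_append, ← hk]
      · rw [if_neg (by simpa [inner_getD] using hlt), ih]
        refine List.map_congr_left ?_
        intro n _
        by_cases hn : n = k
        · subst hn; simp [hMk, hlt]
        · have hn' : ¬ k = n := fun h => hn h.symm
          simp [hn', maxFor_append, ← hk]
    · -- new name: appended on both sides
      have hc : d.contains k = false := by rw [hcont]; simpa using hkN
      have hns : namesStep fir las N x = N ++ [k] := by
        rw [namesStep_eq, ← hk, if_neg (by simpa using hkN)]
      have hfnil : t.filter (fun i => pvKey fir las i == k) = [] := by
        by_contra hne
        exact hkN ((mem_names_iff_filter_ne_nil fir las t k).mpr hne)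
      have hMk : pvMaxFor fir las dt k (t ++ [x]) = v := by
        rw [maxFor_append, if_pos (by simp [← hk]), hfnil]; rfl
      rw [hstep, if_neg (by simp [hc]), hns]
      show (d.insert k (PySem.Dict.mk [("last attendance", v)])).items = _
      rw [PySem.Dict.items_insert, if_neg (by simp [hc]), ih, List.map_append]
      congr 1
      · refine List.map_congr_left ?_
        intro n hn
        have hnk : ¬ k = n := fun h => hkN (h ▸ hn)
        simp [hnk, maxFor_append, ← hk]
      · simp [hMk]

-- ===== VERDICT (by name: the statement is the Claim_ definition above) =====
theorem dict_create_spec : Claim_equal_dict_create := by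
  intro a_list fir las dt _ _
  show dict_create a_list fir las dt = dict_create_alt a_list fir las dt
  unfold dict_create dict_create_alt
  rw [main_items, List.map_map]
  rfl
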